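-- pv_equiv track=rewrite | github.com/vishalsingh17-web2/Example | checkArrayIsSorted.py | elementJustGreater
-- ===== SOURCE A (Python) =====
-- def elementJustGreater(arr, start,end, target):
--     if(start<=end):
--         mid = start+(end-start)//2
--         if(arr[mid]==target):
--             if(mid+1<len(arr)):
--                 return arr[mid+1]
--             else:
--                 return -1
--         elif(arr[mid]>target):
--             return elementJustGreater(arr,start,mid-1,target)
--         else:
--             return elementJustGreater(arr,mid+1,end,target)
--     else:
--         if(start<len(arr)):
--             return arr[start]
--         else:
--             return -1
-- ===== SOURCE B (Python) =====
-- def elementJustGreater(arr, start, end, target):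
--     n = len(arr)
--     lo, hi = start, end
--     while lo <= hi:
--         mid = (lo + hi) // 2
--         v = arr[mid]
--         if v < target:
--             lo = mid + 1
--         elif v > target:
--             hi = mid - 1
--         else:
--             return arr[mid + 1] if mid + 1 < n else -1
--     return arr[lo] if lo < n else -1
-- ===== Notes on version B (the rewrite author's own statement) =====
-- stated objective: idiomatic
-- what changed: Replaces A's tail recursion with an iterative lo/hi while-loop that uses the (lo+hi)//2 midpoint and a less-than-first branch order (recurse-right / recurse-left / found), removing the recursive calls.
-- outside the precondition, e.g. on elementJustGreater([1, 2, 3], -10, 10, 1): A returns 2, B returns 2; on elementJustGreater([1, 2, 3], 0, 5, 4): A raises IndexError, B raises IndexError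
import Mathlib
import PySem

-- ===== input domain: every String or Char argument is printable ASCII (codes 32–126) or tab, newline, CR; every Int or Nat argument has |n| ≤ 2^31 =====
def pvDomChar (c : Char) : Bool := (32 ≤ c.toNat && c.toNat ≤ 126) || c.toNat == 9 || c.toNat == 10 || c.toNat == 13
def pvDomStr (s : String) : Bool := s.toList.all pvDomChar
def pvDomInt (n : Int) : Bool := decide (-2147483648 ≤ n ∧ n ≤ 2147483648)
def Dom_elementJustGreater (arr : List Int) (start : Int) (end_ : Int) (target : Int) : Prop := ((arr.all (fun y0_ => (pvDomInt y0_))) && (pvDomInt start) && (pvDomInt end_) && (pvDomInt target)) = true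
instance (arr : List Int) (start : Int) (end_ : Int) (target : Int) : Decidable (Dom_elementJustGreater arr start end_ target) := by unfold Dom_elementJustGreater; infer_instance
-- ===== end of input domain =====

-- B replaces A's tail recursion by an iterative lo/hi loop with the (lo+hi)//2 midpoint and
-- a less-than-first branch order: a plainer decomposition, same O(log n) search, proved equal on Pre_.

-- ===== PORT A =====
-- Literal port of A's recursion. `PySem.List.pyGet? = none` is Python's IndexError;
-- the 0 default there is never the claimed value (Pre_ excludes those inputs).
def elementJustGreater (arr : List Int) (start : Int) (end_ : Int) (target : Int) : Int :=
  if start ≤ end_ then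
    let mid := start + PySem.Int.floordiv (end_ - start) 2
    match PySem.List.pyGet? arr mid with
    | none => 0  -- IndexError in Python; outside Pre_
    | some v =>
      if v == target then
        if mid + 1 < (arr.length : Int) then (PySem.List.pyGet? arr (mid + 1)).getD 0
        else -1
      else if v > target then elementJustGreater arr start (mid - 1) target
      else elementJustGreater arr (mid + 1) end_ target
  else
    if start < (arr.length : Int) then (PySem.List.pyGet? arr start).getD 0
    else -1
termination_by (end_ + 1 - start).toNat
decreasing_by
  all_goals
    have h2 := PySem.Int.floordiv_eq_ediv_of_pos (a := end_ - start) (b := 2) (by omega)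
    simp only [h2] at *
    omega

-- ===== PORT B =====
-- Source B's while-loop: one step per iteration; `Sum.inl r` is an early `return r` inside the
-- loop, `Sum.inr lo` is normal loop exit with the final value of `lo`.
def ejgSearch (arr : List Int) (target : Int) (lo hi : Int) : Int ⊕ Int :=
  if _h : lo ≤ hi then
    let mid := PySem.Int.floordiv (lo + hi) 2
    match PySem.List.pyGet? arr mid with
    | none => Sum.inl 0  -- IndexError in Python; outside Pre_
    | some v =>
      if v < target then ejgSearch arr target (mid + 1) hi
      else if target < v then ejgSearch arr target lo (mid - 1)
      else Sum.inl (if mid + 1 < (arr.length : Int) then (PySem.List.pyGet? arr (mid + 1)).getD 0 else -1)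
  else Sum.inr lo
termination_by (hi + 1 - lo).toNat
decreasing_by
  all_goals
    have h2 := PySem.Int.floordiv_eq_ediv_of_pos (a := lo + hi) (b := 2) (by omega)
    simp only [h2] at *
    omega

def elementJustGreater_alt (arr : List Int) (start : Int) (end_ : Int) (target : Int) : Int :=
  match ejgSearch arr target start end_ with
  | Sum.inl r => r
  | Sum.inr lo => if lo < (arr.length : Int) then (PySem.List.pyGet? arr lo).getD 0 else -1

-- ===== PRECONDITION & SPEC =====
-- Pre_ admits every input whose indices stay in range throughout (A then returns, possibly via
-- Python's negative-index rule, which B shares): it excludes the inputs where A raises IndexError,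
-- and the degenerate windows with start < -len(arr) on which A may still return through an
-- in-range midpoint before reaching the bad index — an accident of the search path, outside the
-- function's natural domain.
def Pre_elementJustGreater (arr : List Int) (start : Int) (end_ : Int) (target : Int) : Prop :=
  -(arr.length : Int) ≤ start ∧ (start ≤ end_ → end_ < (arr.length : Int))
instance (arr : List Int) (start : Int) (end_ : Int) (target : Int) : Decidable (Pre_elementJustGreater arr start end_ target) := by unfold Pre_elementJustGreater; infer_instance

def pvWitness_elementJustGreater : List Int × Int × Int × Int := ([1, 2, 3], 0, 2, 1)

def Spec_elementJustGreater (arr : List Int) (start : Int) (end_ : Int) (target : Int) (out : Int) : Prop := out = elementJustGreater_alt arr start end_ target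
instance (arr : List Int) (start : Int) (end_ : Int) (target : Int) (out : Int) : Decidable (Spec_elementJustGreater arr start end_ target out) := by unfold Spec_elementJustGreater; infer_instance

-- ===== CLAIM (what is proved, stated in full; the proofs are below) =====
def Claim_equal_elementJustGreater : Prop := ∀ (arr : List Int) (start : Int) (end_ : Int) (target : Int), Dom_elementJustGreater arr start end_ target → Pre_elementJustGreater arr start end_ target → Spec_elementJustGreater arr start end_ target (elementJustGreater arr start end_ target)

-- ===== LEMMAS AND PROOFS =====

-- The two midpoint formulas agree, and A's (==, >) branch tests and B's (<, <) tests decide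
-- the same trichotomy, so the recursion and the loop narrow identical windows: the ports are
-- equal on every input (the claim specialises this to Pre_).
theorem ejg_eq_aux (arr : List Int) (target : Int) :
    ∀ (n : Nat) (start end_ : Int), (end_ + 1 - start).toNat ≤ n →
      elementJustGreater arr start end_ target = elementJustGreater_alt arr start end_ target := by
  intro n
  induction n with
  | zero =>
    intro start end_ hn
    have hle : ¬ start ≤ end_ := by omega
    rw [elementJustGreater, elementJustGreater_alt, ejgSearch]
    simp only [if_neg hle, dif_neg hle]
  | succ n ih =>
    intro start end_ hn
    rw [elementJustGreater, elementJustGreater_alt, ejgSearch]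
    by_cases hle : start ≤ end_
    · have hfd1 := PySem.Int.floordiv_eq_ediv_of_pos (a := end_ - start) (b := 2)
        (by omega : (0:Int) < 2)
      have hfd2 := PySem.Int.floordiv_eq_ediv_of_pos (a := start + end_) (b := 2)
        (by omega : (0:Int) < 2)
      have hmid : start + PySem.Int.floordiv (end_ - start) 2
          = PySem.Int.floordiv (start + end_) 2 := by
        rw [hfd1, hfd2]; omega
      simp only [if_pos hle, dif_pos hle, ← hmid]
      cases hget : PySem.List.pyGet? arr (start + PySem.Int.floordiv (end_ - start) 2) with
      | none => rfl
      | some v =>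
        rcases lt_trichotomy v target with hv | hv | hv
        · have h1 : (v == target) = false := by simp [hv.ne]
          simp only [h1, if_pos hv, Bool.false_eq_true, if_false, if_neg (not_lt.mpr hv.le)]
          have := ih (start + PySem.Int.floordiv (end_ - start) 2 + 1) end_
            (by simp only [hfd1]; omega)
          rw [elementJustGreater_alt] at this
          exact this
        · have h1 : (v == target) = true := by simp [hv]
          simp only [hv, if_true, lt_irrefl, if_false, beq_self_eq_true]
        · have h1 : (v == target) = false := by simp [hv.ne']
          simp only [h1, Bool.false_eq_true, if_false,
            if_neg (not_lt.mpr hv.le), if_pos hv]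
          have := ih start (start + PySem.Int.floordiv (end_ - start) 2 - 1)
            (by simp only [hfd1]; omega)
          rw [elementJustGreater_alt] at this
          exact this
    · simp only [if_neg hle, dif_neg hle]

-- ===== VERDICT (by name: the statement is the Claim_ definition above) =====
theorem elementJustGreater_spec : Claim_equal_elementJustGreater := by
  intro arr start end_ target _ _
  exact ejg_eq_aux arr target (end_ + 1 - start).toNat start end_ le_rfl
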